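-- pv_equiv track=rewrite | github.com/Olorin-ai-git/Bayit-Plus | olorin-server/app/service/agent/patterns/parallelization.py | _find_common_keywords
-- ===== SOURCE A (Python) =====
-- from typing import Any, Dict, List, Optional
--
-- def _find_common_keywords(content_list: List[str]) -> List[str]:
--     """Find keywords that appear in multiple results"""
--
--     fraud_keywords = [
--         "suspicious", "anomaly", "risk", "fraud", "unusual", "pattern",
--         "high", "low", "medium", "score", "behavior", "deviation"
--     ]
--
--     common_keywords = []
--     threshold = len(content_list) / 2  # Must appear in at least half the results
--
--     for keyword in fraud_keywords:
--         appearances = sum(1 for content in content_list if keyword in content)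
--         if appearances >= threshold:
--             common_keywords.append(keyword)
--
--     return common_keywords
-- ===== SOURCE B (Python) =====
-- from typing import Any, Dict, List, Optional
--
-- def _find_common_keywords(content_list: List[str]) -> List[str]:
--     """Find keywords that appear in multiple results"""
--
--     fraud_keywords = [
--         "suspicious", "anomaly", "risk", "fraud", "unusual", "pattern",
--         "high", "low", "medium", "score", "behavior", "deviation"
--     ]
--
--     # Majority vote by signed balance: each content votes +1 for every keyword
--     # it contains and -1 for every keyword it lacks.  A keyword appears in at
--     # least half the results  <=>  its final balance is >= 0, so no length or
--     # threshold is ever computed.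
--     balances = [0] * len(fraud_keywords)
--     for content in content_list:
--         balances = [b + 1 if kw in content else b - 1
--                     for kw, b in zip(fraud_keywords, balances)]
--
--     return [kw for kw, b in zip(fraud_keywords, balances) if b >= 0]
-- ===== Notes on version B (the rewrite author's own statement) =====
-- stated objective: alternative
-- what changed: A counts per-keyword appearances and compares each count with the threshold len(content_list)/2; B runs a majority vote: one pass over content_list updating a signed balance per keyword (+1 if contained, -1 if not), then keeps keywords with balance >= 0 - no count, length or threshold is computed (count >= n/2 iff count - (n - count) >= 0).
import Mathlib
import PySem

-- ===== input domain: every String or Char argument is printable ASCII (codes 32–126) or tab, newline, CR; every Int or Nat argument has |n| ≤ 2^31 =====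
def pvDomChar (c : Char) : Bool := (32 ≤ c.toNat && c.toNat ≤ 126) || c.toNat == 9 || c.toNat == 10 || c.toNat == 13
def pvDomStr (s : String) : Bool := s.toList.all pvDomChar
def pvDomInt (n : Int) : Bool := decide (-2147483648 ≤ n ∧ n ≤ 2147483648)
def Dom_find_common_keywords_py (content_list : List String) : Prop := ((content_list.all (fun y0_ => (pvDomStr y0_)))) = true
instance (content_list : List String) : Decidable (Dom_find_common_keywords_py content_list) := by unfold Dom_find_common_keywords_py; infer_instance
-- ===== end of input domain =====

-- B replaces A's per-keyword count-vs-threshold test by a majority vote: one pass over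
-- content_list updating a signed balance per keyword, keeping keywords with balance ≥ 0
-- (objective: alternative algorithm, no length/threshold computed).

def pvFraudKeywords : List String :=
  ["suspicious", "anomaly", "risk", "fraud", "unusual", "pattern",
   "high", "low", "medium", "score", "behavior", "deviation"]

-- ===== PORT A =====
-- A compares the int `appearances` with the float `len(content_list)/2`; since both are
-- ints, `a >= n/2` is exactly `2*a >= n` (exact rendering).
def find_common_keywords_py (content_list : List String) : List String :=
  pvFraudKeywords.foldl (fun common_keywords keyword =>
    let appearances : Int :=
      content_list.foldl (fun acc content =>
        if PySem.Str.isIn keyword content then acc + 1 else acc) 0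
    if 2 * appearances ≥ (content_list.length : Int)
    then common_keywords ++ [keyword] else common_keywords) []

-- ===== PORT B =====
def find_common_keywords_py_alt (content_list : List String) : List String :=
  let balances : List Int :=
    content_list.foldl (fun bs content =>
      List.zipWith (fun kw b => if PySem.Str.isIn kw content then b + 1 else b - 1)
        pvFraudKeywords bs)
      (List.replicate pvFraudKeywords.length (0 : Int))
  ((pvFraudKeywords.zip balances).filter (fun p => p.2 ≥ 0)).map Prod.fst

-- ===== PRECONDITION & SPEC =====
def Spec_find_common_keywords_py (content_list : List String) (out : List String) : Prop := out = find_common_keywords_py_alt content_list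
instance (content_list : List String) (out : List String) : Decidable (Spec_find_common_keywords_py content_list out) := by unfold Spec_find_common_keywords_py; infer_instance

-- ===== CLAIM =====
def Claim_equal_find_common_keywords_py : Prop := ∀ (content_list : List String), Dom_find_common_keywords_py content_list → Spec_find_common_keywords_py content_list (find_common_keywords_py content_list)

-- ===== LEMMAS AND PROOFS =====

theorem pv_zipWith_map_self {α β γ : Type} (g : α → β → γ) (f : α → β) (l : List α) :
    List.zipWith g l (l.map f) = l.map (fun x => g x (f x)) := by
  induction l with
  | nil => rfl
  | cons a t ih => simp [List.zipWith, ih]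

theorem pv_zip_map_self {α β : Type} (f : α → β) (l : List α) :
    l.zip (l.map f) = l.map (fun x => (x, f x)) :=
  pv_zipWith_map_self Prod.mk f l

-- the signed balance of one keyword over a list of contents
def pvBal (kw : String) (L : List String) : Int :=
  2 * (L.countP (fun content => PySem.Str.isIn kw content) : Int) - (L.length : Int)

-- the one-pass balance fold, started from any map over the keywords, is a map over the keywords
theorem pv_fold_balances (L : List String) (f : String → Int) :
    L.foldl (fun bs content =>
      List.zipWith (fun kw b => if PySem.Str.isIn kw content then b + 1 else b - 1)
        pvFraudKeywords bs)
      (pvFraudKeywords.map f)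
      = pvFraudKeywords.map (fun kw => f kw + pvBal kw L) := by
  induction L generalizing f with
  | nil => simp [pvBal]
  | cons c rest ih =>
    simp only [List.foldl_cons]
    have hstep : List.zipWith (fun kw b => if PySem.Str.isIn kw c then b + 1 else b - 1)
        pvFraudKeywords (pvFraudKeywords.map f)
        = pvFraudKeywords.map (fun kw => if PySem.Str.isIn kw c then f kw + 1 else f kw - 1) := by
      exact pv_zipWith_map_self _ f pvFraudKeywords
    rw [hstep, ih]
    refine List.map_congr_left ?_
    intro kw _
    simp only [pvBal, List.countP_cons, List.length_cons]
    split_ifs <;> push_cast <;> omega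

theorem pv_alt_eq_filter (content_list : List String) :
    find_common_keywords_py_alt content_list
      = pvFraudKeywords.filter (fun kw => pvBal kw content_list ≥ 0) := by
  unfold find_common_keywords_py_alt
  have hrep : (List.replicate pvFraudKeywords.length (0 : Int))
      = pvFraudKeywords.map (fun _ => (0 : Int)) := by
    rw [List.map_const']
  rw [hrep, pv_fold_balances content_list (fun _ => 0)]
  have hzip : pvFraudKeywords.zip (pvFraudKeywords.map (fun kw => 0 + pvBal kw content_list))
      = pvFraudKeywords.map (fun kw => (kw, 0 + pvBal kw content_list)) :=
    pv_zip_map_self _ pvFraudKeywords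
  show ((pvFraudKeywords.zip (pvFraudKeywords.map (fun kw => 0 + pvBal kw content_list))).filter
      (fun p => p.2 ≥ 0)).map Prod.fst = _
  rw [hzip, List.filter_map, List.map_map]
  simp only [Function.comp_def, zero_add]
  rw [List.map_id']

theorem find_common_keywords_py_spec' (content_list : List String) :
    find_common_keywords_py content_list = find_common_keywords_py_alt content_list := by
  have hA : find_common_keywords_py content_list
      = pvFraudKeywords.foldl (fun ck kw =>
          if 2 * (content_list.foldl (fun acc content =>
                if PySem.Str.isIn kw content then acc + 1 else acc) 0)
              ≥ (content_list.length : Int)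
          then ck ++ [kw] else ck) [] := rfl
  rw [hA, pv_alt_eq_filter, PySem.List.foldl_append_ite_eq_filter, List.nil_append]
  refine List.filter_congr ?_
  intro kw _
  rw [PySem.List.foldl_ite_add_one]
  have hp : (fun x => decide (PySem.Str.isIn kw x = true))
      = (fun content => PySem.Str.isIn kw content) := by
    funext x; simp
  simp only [pvBal, hp, ge_iff_le, decide_eq_decide]
  omega

-- ===== VERDICT =====
theorem find_common_keywords_py_spec : Claim_equal_find_common_keywords_py := by
  intro content_list _
  exact find_common_keywords_py_spec' content_list
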